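-- pv_equiv track=rewrite | github.com/hansmaulwurf23/aoc | aopython/aopython.py | min_max_2d
-- ===== SOURCE A (Python) =====
-- def min_max_2d(coords):
--     """
--     Calculates the min and max of every dimension in 2D
--     :param coords: iterable holding [x, y] (or vice versa)
--     :return: min_x, max_x, min_y, max_y (or vice versa, as u map)
--     """
--     fx, tx, fy, ty = [None] * 4
--     for c in coords:
--         if tx is None or c[0] > tx:
--             tx = c[0]
--         if fx is None or c[0] < fx:
--             fx = c[0]
--         if ty is None or c[1] > ty:
--             ty = c[1]
--         if fy is None or c[1] < fy:
--             fy = c[1]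
--
--     return fx, tx, fy, ty
-- ===== SOURCE B (Python) =====
-- def min_max_2d(coords):
--     cs = list(coords)
--     if not cs:
--         return None, None, None, None
--     xs = [c[0] for c in cs]
--     ys = [c[1] for c in cs]
--     return min(xs), max(xs), min(ys), max(ys)
-- ===== Notes on version B (the rewrite author's own statement) =====
-- stated objective: simpler
-- what changed: Replaces A's single interleaved pass with four None-guarded manual comparisons by per-dimension projections reduced with the builtins min/max, after an explicit empty-input guard.
-- outside the precondition, e.g. on min_max_2d([]): A returns (None, None, None, None), B returns (None, None, None, None)
import Mathlib
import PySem

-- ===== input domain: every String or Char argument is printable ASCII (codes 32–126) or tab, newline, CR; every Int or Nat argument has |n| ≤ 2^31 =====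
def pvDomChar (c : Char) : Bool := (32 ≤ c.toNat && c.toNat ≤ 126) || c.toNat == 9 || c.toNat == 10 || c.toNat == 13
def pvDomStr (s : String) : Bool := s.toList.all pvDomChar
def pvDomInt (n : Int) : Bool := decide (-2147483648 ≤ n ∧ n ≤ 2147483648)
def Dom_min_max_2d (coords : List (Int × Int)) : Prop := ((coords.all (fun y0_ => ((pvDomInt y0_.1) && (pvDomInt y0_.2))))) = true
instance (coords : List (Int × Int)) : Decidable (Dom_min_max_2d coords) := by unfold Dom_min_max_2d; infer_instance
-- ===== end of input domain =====

-- B replaces A's single interleaved None-guarded scan by four per-dimension min/max reductions (objective: simpler).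

-- ===== PORT A =====
-- one iteration of A's loop body over the state (fx, tx, fy, ty), each an Option Int (None = not yet set)
def pvStepA (s : Option Int × Option Int × Option Int × Option Int) (c : Int × Int) :
    Option Int × Option Int × Option Int × Option Int :=
  let (fx, tx, fy, ty) := s
  let tx := match tx with | none => some c.1 | some t => if c.1 > t then some c.1 else some t
  let fx := match fx with | none => some c.1 | some f => if c.1 < f then some c.1 else some f
  let ty := match ty with | none => some c.2 | some t => if c.2 > t then some c.2 else some t
  let fy := match fy with | none => some c.2 | some f => if c.2 < f then some c.2 else some f
  (fx, tx, fy, ty)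

def min_max_2d (coords : List (Int × Int)) : Int × Int × Int × Int :=
  match coords.foldl pvStepA (none, none, none, none) with
  | (some fx, some tx, some fy, some ty) => (fx, tx, fy, ty)
  | _ => (0, 0, 0, 0)  -- Python A returns the None tuple here (coords = []); outside Pre_

-- ===== PORT B =====
def min_max_2d_alt (coords : List (Int × Int)) : Int × Int × Int × Int :=
  match coords with
  | [] => (0, 0, 0, 0)  -- Python B returns the None tuple here; outside Pre_
  | _ :: _ =>
    let xs := coords.map Prod.fst
    let ys := coords.map Prod.snd
    ((PySem.List.min? xs (fun x => x)).getD 0, (PySem.List.max? xs (fun x => x)).getD 0,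
     (PySem.List.min? ys (fun x => x)).getD 0, (PySem.List.max? ys (fun x => x)).getD 0)

-- ===== PRECONDITION & SPEC =====
-- Pre_ excludes only the empty list, where A returns (None, None, None, None) — not a value of the declared int 4-tuple type.
def Pre_min_max_2d (coords : List (Int × Int)) : Prop := coords ≠ []
instance (coords : List (Int × Int)) : Decidable (Pre_min_max_2d coords) := by unfold Pre_min_max_2d; infer_instance
def pvWitness_min_max_2d : (List (Int × Int)) := [(3, -1), (0, 5)]
def Spec_min_max_2d (coords : List (Int × Int)) (out : Int × Int × Int × Int) : Prop := out = min_max_2d_alt coords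
instance (coords : List (Int × Int)) (out : Int × Int × Int × Int) : Decidable (Spec_min_max_2d coords out) := by unfold Spec_min_max_2d; infer_instance

-- ===== CLAIM (what is proved, stated in full; the proofs are below) =====
def Claim_equal_min_max_2d : Prop := ∀ (coords : List (Int × Int)), Dom_min_max_2d coords → Pre_min_max_2d coords → Spec_min_max_2d coords (min_max_2d coords)

-- ===== LEMMAS AND PROOFS =====

-- once every component of the state is set, A's loop is component-wise running min/max
theorem pvStepA_some (l : List (Int × Int)) : ∀ (a b p q : Int),
    l.foldl pvStepA (some a, some b, some p, some q) =
      (some (l.foldl (fun m c => min m c.1) a), some (l.foldl (fun m c => max m c.1) b),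
       some (l.foldl (fun m c => min m c.2) p), some (l.foldl (fun m c => max m c.2) q)) := by
  induction l with
  | nil => intro a b p q; rfl
  | cons c t ih =>
    intro a b p q
    have h1 : (if c.1 < a then some c.1 else some a) = some (min a c.1) := by rw [min_def]; split_ifs <;> simp <;> omega
    have h2 : (if c.1 > b then some c.1 else some b) = some (max b c.1) := by rw [max_def]; split_ifs <;> simp <;> omega
    have h3 : (if c.2 < p then some c.2 else some p) = some (min p c.2) := by rw [min_def]; split_ifs <;> simp <;> omega
    have h4 : (if c.2 > q then some c.2 else some q) = some (max q c.2) := by rw [max_def]; split_ifs <;> simp <;> omega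
    simp only [List.foldl_cons, pvStepA, h1, h2, h3, h4, ih]

-- ===== VERDICT (by name: the statement is the Claim_ definition above) =====
theorem min_max_2d_spec : Claim_equal_min_max_2d := by
  intro coords _ hpre
  unfold Spec_min_max_2d
  match coords with
  | [] => exact absurd rfl hpre
  | c :: t =>
    show min_max_2d (c :: t) = min_max_2d_alt (c :: t)
    unfold min_max_2d min_max_2d_alt
    simp only [List.foldl_cons, pvStepA, List.map_cons,
      PySem.List.min?_id_cons, PySem.List.max?_id_cons, List.foldl_map,
      pvStepA_some (l := t), Option.getD_some]
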